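-- pv_equiv track=rewrite | github.com/cyphou/OpenTextToFabric | report_converter/expression_converter.py | _build_nested_if
-- ===== SOURCE A (Python) =====
-- def _build_nested_if(branches: list[tuple[str, str]]) -> str:
--     """Build nested IF() from [(condition, body), ...] list.
--
--     The last branch may have an empty condition (the final else).
--     """
--     if not branches:
--         return ""
--
--     if len(branches) == 1:
--         cond, body = branches[0]
--         if cond:
--             return f"IF({cond}, {body})"
--         return body
--
--     # Pop the last branch — if it's unconditional, it's the final else
--     *cond_branches, last = branches
--     if last[0]:
--         # All branches are conditional (no else)
--         cond_branches.append(last)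
--         last = None
--
--     # Build from inside out
--     if last:
--         result = last[1]
--     else:
--         result = "BLANK()"
--
--     for cond, body in reversed(cond_branches):
--         result = f"IF({cond}, {body}, {result})"
--
--     return result
-- ===== SOURCE B (Python) =====
-- def _build_nested_if(branches: list[tuple[str, str]]) -> str:
--     """Build nested IF() from [(condition, body), ...] list, head-recursively."""
--     if not branches:
--         return ""
--     if len(branches) == 1:
--         cond, body = branches[0]
--         return f"IF({cond}, {body})" if cond else body
--     if branches[-1][0]:
--         base, wrap = "BLANK()", branches
--     else:
--         base, wrap = branches[-1][1], branches[:-1]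
--
--     def chain(bs):
--         if not bs:
--             return base
--         cond, body = bs[0]
--         return f"IF({cond}, {body}, {chain(bs[1:])})"
--
--     return chain(wrap)
-- ===== Notes on version B (the rewrite author's own statement) =====
-- stated objective: alternative
-- what changed: Replaces A's inside-out accumulator loop over the reversed branch list (plus list surgery appending the last branch back) with a head-recursive chain builder that nests outside-in over the original branch order.
import Mathlib
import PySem

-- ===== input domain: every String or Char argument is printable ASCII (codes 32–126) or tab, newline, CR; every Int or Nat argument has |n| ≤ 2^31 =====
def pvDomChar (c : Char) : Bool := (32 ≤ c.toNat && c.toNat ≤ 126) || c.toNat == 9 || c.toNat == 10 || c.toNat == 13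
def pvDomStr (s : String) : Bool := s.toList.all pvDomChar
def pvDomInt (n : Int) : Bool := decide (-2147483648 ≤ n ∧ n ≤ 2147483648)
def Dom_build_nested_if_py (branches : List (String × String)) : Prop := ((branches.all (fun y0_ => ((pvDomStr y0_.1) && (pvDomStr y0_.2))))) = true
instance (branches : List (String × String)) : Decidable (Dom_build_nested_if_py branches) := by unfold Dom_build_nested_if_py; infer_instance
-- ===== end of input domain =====

-- B replaces A's inside-out accumulator loop over the reversed branch list with a
-- head-recursive chain builder over the original order (same value; alternative decomposition).

-- ===== PORT A =====
def build_nested_if_py (branches : List (String × String)) : String :=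
  match branches with
  | [] => ""
  | [(cond, body)] =>
      if cond ≠ "" then "IF(" ++ cond ++ ", " ++ body ++ ")" else body
  | _ =>
      -- *cond_branches, last = branches;  if last[0]: append last back, last = None
      let last0 := branches.getLastD ("", "")
      let condBranches : List (String × String) :=
        if last0.1 ≠ "" then branches.dropLast ++ [last0] else branches.dropLast
      let lastOpt : Option (String × String) :=
        if last0.1 ≠ "" then none else some last0
      let result0 := match lastOpt with
        | some l => l.2
        | none => "BLANK()"
      condBranches.reverse.foldl
        (fun res cb => "IF(" ++ cb.1 ++ ", " ++ cb.2 ++ ", " ++ res ++ ")") result0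

-- ===== PORT B =====
def pvChain (base : String) : List (String × String) → String
  | [] => base
  | (cond, body) :: rest => "IF(" ++ cond ++ ", " ++ body ++ ", " ++ pvChain base rest ++ ")"

def build_nested_if_py_alt (branches : List (String × String)) : String :=
  if branches.isEmpty then ""
  else if branches.length = 1 then
    let cb := branches.headD ("", "")
    if cb.1 ≠ "" then "IF(" ++ cb.1 ++ ", " ++ cb.2 ++ ")" else cb.2
  else
    let lastb := branches.getLastD ("", "")
    if lastb.1 ≠ "" then pvChain "BLANK()" branches
    else pvChain lastb.2 branches.dropLast

-- ===== PRECONDITION & SPEC =====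
def Spec_build_nested_if_py (branches : List (String × String)) (out : String) : Prop := out = build_nested_if_py_alt branches
instance (branches : List (String × String)) (out : String) : Decidable (Spec_build_nested_if_py branches out) := by unfold Spec_build_nested_if_py; infer_instance

-- ===== CLAIM (what is proved, stated in full; the proofs are below) =====
def Claim_equal_build_nested_if_py : Prop := ∀ (branches : List (String × String)), Dom_build_nested_if_py branches → Spec_build_nested_if_py branches (build_nested_if_py branches)

-- ===== LEMMAS AND PROOFS =====

-- folding A's wrapper over the reversed list equals B's head recursion over the list
theorem foldl_reverse_eq_chain (l : List (String × String)) (base : String) :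
    l.reverse.foldl
      (fun res cb => "IF(" ++ cb.1 ++ ", " ++ cb.2 ++ ", " ++ res ++ ")") base
      = pvChain base l := by
  induction l with
  | nil => rfl
  | cons x xs ih =>
      simp only [List.reverse_cons, List.foldl_append, List.foldl_cons, List.foldl_nil, ih,
        pvChain]

theorem dropLast_append_getLastD (l : List (String × String)) (h : l ≠ [])
    (d : String × String) : l.dropLast ++ [l.getLastD d] = l := by
  induction l with
  | nil => exact absurd rfl h
  | cons x xs ih =>
      cases xs with
      | nil => rfl
      | cons y ys => simpa using ih (by simp)

-- ===== VERDICT (by name: the statement is the Claim_ definition above) =====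
theorem build_nested_if_py_spec : Claim_equal_build_nested_if_py := by
  intro branches _
  unfold Spec_build_nested_if_py build_nested_if_py build_nested_if_py_alt
  match branches with
  | [] => rfl
  | [(cond, body)] => rfl
  | a :: b :: rest =>
      rw [if_neg (by simp), if_neg (by simp)]
      simp only
      split_ifs with h
      · simp only [foldl_reverse_eq_chain,
          dropLast_append_getLastD (a :: b :: rest) (by simp) ("", "")]
      · simp only [foldl_reverse_eq_chain]
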